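-- pv_equiv track=rewrite | github.com/Apophany/advent-of-code-2021 | day_2/puzzle_1/dive.py | dive
-- ===== SOURCE A (Python) =====
-- def dive(inputs: list[str]) -> int:
--     x_axis = 0
--     y_axis = 0
--
--     for input in inputs:
--         parts = input.split()
--
--         if parts[0] == 'forward':
--             x_axis += int(parts[1])
--         if parts[0] == 'up':
--             y_axis -= int(parts[1])
--         if parts[0] == 'down':
--             y_axis += int(parts[1])
--
--     return x_axis * y_axis
-- ===== SOURCE B (Python) =====
-- def dive(inputs: list[str]) -> int:
--     # Stage 1: parse every line once into its word list.
--     moves = [line.split() for line in inputs]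
--     # Stage 2: one filtered sum per direction word.
--     forward = sum(int(p[1]) for p in moves if p[0] == 'forward')
--     down = sum(int(p[1]) for p in moves if p[0] == 'down')
--     up = sum(int(p[1]) for p in moves if p[0] == 'up')
--     # Stage 3: combine.
--     return forward * (down - up)
-- ===== Notes on version B (the rewrite author's own statement) =====
-- stated objective: simpler
-- what changed: B replaces A's single stateful loop with two counters and three branches by staged passes: parse all lines once, then compute each direction's total as a separate filtered sum, then combine as forward*(down-up).
import Mathlib
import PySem

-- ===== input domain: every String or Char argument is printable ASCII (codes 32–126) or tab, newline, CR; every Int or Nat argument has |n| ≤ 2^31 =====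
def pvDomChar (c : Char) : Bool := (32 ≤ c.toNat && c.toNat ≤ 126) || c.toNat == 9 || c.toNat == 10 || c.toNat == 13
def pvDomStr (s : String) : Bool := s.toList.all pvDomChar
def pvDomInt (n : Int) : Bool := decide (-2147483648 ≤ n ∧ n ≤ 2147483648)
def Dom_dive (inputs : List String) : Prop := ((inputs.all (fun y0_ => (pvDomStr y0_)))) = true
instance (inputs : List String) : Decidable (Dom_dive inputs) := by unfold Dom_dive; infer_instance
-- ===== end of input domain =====

-- B restructures A's single two-counter loop into staged passes: parse all lines once,
-- take one filtered sum per direction word, then combine as forward*(down-up) (objective: simpler).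


-- ===== PORT A =====
-- int(parts[1]), totalised: outside Pre_dive (where Python raises) it yields 0
def pvIntAt (parts : List String) : Int :=
  ((PySem.List.pyGet? parts 1).bind PySem.Int.ofStr?).getD 0

-- one iteration of A's loop body (the three independent ifs, in order)
def diveStepA (st : Int × Int) (s : String) : Int × Int :=
  let parts := PySem.Str.split₀ s
  let p0 := (PySem.List.pyGet? parts 0).getD ""
  let st := if p0 == "forward" then (st.1 + pvIntAt parts, st.2) else st
  let st := if p0 == "up" then (st.1, st.2 - pvIntAt parts) else st
  let st := if p0 == "down" then (st.1, st.2 + pvIntAt parts) else st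
  st

def dive (inputs : List String) : Int :=
  let st := inputs.foldl diveStepA (0, 0)
  st.1 * st.2

-- ===== PORT B =====
-- sum(int(p[1]) for p in moves if p[0] == w), one direction's filtered sum
def dirSum (moves : List (List String)) (w : String) : Int :=
  ((moves.filter (fun p => (PySem.List.pyGet? p 0).getD "" == w)).map pvIntAt).sum

def dive_alt (inputs : List String) : Int :=
  let moves := inputs.map PySem.Str.split₀
  let forward := dirSum moves "forward"
  let down := dirSum moves "down"
  let up := dirSum moves "up"
  forward * (down - up)

-- ===== PRECONDITION & SPEC =====
-- Pre_ excludes exactly the lines where Python A raises: a line whose split() is empty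
-- (IndexError on parts[0]) or whose direction word needs parts[1] but it is missing
-- (IndexError) or not an int literal (ValueError).
def Pre_dive (inputs : List String) : Prop :=
  ∀ s ∈ inputs,
    PySem.Str.split₀ s ≠ [] ∧
    ((PySem.List.pyGet? (PySem.Str.split₀ s) 0).getD "" ∈ (["forward", "up", "down"] : List String) →
      ((PySem.List.pyGet? (PySem.Str.split₀ s) 1).bind PySem.Int.ofStr?).isSome)
instance (inputs : List String) : Decidable (Pre_dive inputs) := by unfold Pre_dive; infer_instance

def pvWitness_dive : List String := ["forward 5", "down 8", "up 3", "sideways"]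

def Spec_dive (inputs : List String) (out : Int) : Prop := out = dive_alt inputs
instance (inputs : List String) (out : Int) : Decidable (Spec_dive inputs out) := by unfold Spec_dive; infer_instance

-- ===== CLAIM (what is proved, stated in full; the proofs are below) =====
def Claim_equal_dive : Prop := ∀ (inputs : List String), Dom_dive inputs → Pre_dive inputs → Spec_dive inputs (dive inputs)

-- ===== LEMMAS AND PROOFS =====

-- Loop invariant: A's foldl from (x, y) equals (x + forward-sum, y + down-sum − up-sum).
theorem dive_inv (inputs : List String) (x y : Int) :
    inputs.foldl diveStepA (x, y) =
      (x + dirSum (inputs.map PySem.Str.split₀) "forward",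
       y + dirSum (inputs.map PySem.Str.split₀) "down"
         - dirSum (inputs.map PySem.Str.split₀) "up") := by
  induction inputs generalizing x y with
  | nil => simp [dirSum]
  | cons s rest ih =>
    simp only [List.foldl_cons, List.map_cons]
    set p := PySem.Str.split₀ s with hp
    set w := (PySem.List.pyGet? p 0).getD "" with hw
    have hcons : ∀ d : String,
        dirSum (p :: rest.map PySem.Str.split₀) d =
          (if w == d then pvIntAt p else 0) + dirSum (rest.map PySem.Str.split₀) d := by
      intro d
      by_cases h : w = d <;> simp [dirSum, ← hw, h]
    by_cases h1 : w = "forward"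
    · have hA : diveStepA (x, y) s = (x + pvIntAt p, y) := by
        simp [diveStepA, ← hp, ← hw, h1]
      rw [hA, ih, hcons, hcons, hcons]
      simp [h1]; ring
    · by_cases h2 : w = "up"
      · have hA : diveStepA (x, y) s = (x, y - pvIntAt p) := by
          simp [diveStepA, ← hp, ← hw, h2]
        rw [hA, ih, hcons, hcons, hcons]
        simp [h2]; ring
      · by_cases h3 : w = "down"
        · have hA : diveStepA (x, y) s = (x, y + pvIntAt p) := by
            simp [diveStepA, ← hp, ← hw, h3]
          rw [hA, ih, hcons, hcons, hcons]
          simp [h3]; ring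
        · have hA : diveStepA (x, y) s = (x, y) := by
            simp [diveStepA, ← hp, ← hw, h1, h2, h3]
          rw [hA, ih, hcons, hcons, hcons]
          simp [h1, h2, h3]

-- ===== VERDICT (by name: the statement is the Claim_ definition above) =====
theorem dive_spec : Claim_equal_dive := by
  intro inputs _ _
  unfold Spec_dive dive dive_alt
  rw [dive_inv inputs 0 0]
  simp
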